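-- pv_equiv track=rewrite | github.com/McMenemy/algorithm-practice | Algorithm-Design/ch4-sorting-and-searching/4-4-color-pairs.py | color_pairs
-- ===== SOURCE A (Python) =====
-- def color_pairs(color_list):
--     red = []
--     blue = []
--     yellow = []
--     for color_tuple in color_list:
--         if color_tuple[1] == 'red':
--             red.append(color_tuple)
--         elif color_tuple[1] == 'blue':
--             blue.append(color_tuple)
--         elif color_tuple[1] == 'yellow':
--             yellow.append(color_tuple)
--
--     return red + blue + yellow
-- ===== SOURCE B (Python) =====
-- def color_pairs(color_list):
--     rank = {'red': 0, 'blue': 1, 'yellow': 2}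
--     keep = [t for t in color_list if t[1] in rank]
--     return sorted(keep, key=lambda t: rank[t[1]])
-- ===== Notes on version B (the rewrite author's own statement) =====
-- stated objective: idiomatic
-- what changed: Replaces the three explicit bucket lists with a rank mapping, a filter keeping only recognized colors, and one stable sort by rank (Timsort stability reproduces the bucket order).
import Mathlib
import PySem

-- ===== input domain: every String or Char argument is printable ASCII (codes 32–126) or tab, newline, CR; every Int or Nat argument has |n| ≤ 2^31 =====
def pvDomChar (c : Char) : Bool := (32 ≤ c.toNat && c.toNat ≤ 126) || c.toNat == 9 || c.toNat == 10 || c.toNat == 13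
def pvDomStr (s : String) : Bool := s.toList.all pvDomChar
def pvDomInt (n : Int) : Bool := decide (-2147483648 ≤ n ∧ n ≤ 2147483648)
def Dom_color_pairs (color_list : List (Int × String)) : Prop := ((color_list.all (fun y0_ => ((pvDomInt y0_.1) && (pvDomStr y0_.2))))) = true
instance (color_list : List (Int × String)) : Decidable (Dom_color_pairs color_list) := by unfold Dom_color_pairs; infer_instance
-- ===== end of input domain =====

-- B replaces A's three explicit bucket lists by a rank mapping, a filter keeping recognized
-- colors, and one stable sort by rank (objective: idiomatic; same observable result).


-- ===== PORT A =====
-- the body of A's loop: append the tuple to its bucket (red/blue/yellow)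
def stepA (st : List (Int × String) × List (Int × String) × List (Int × String))
    (t : Int × String) : List (Int × String) × List (Int × String) × List (Int × String) :=
  if t.2 == "red" then (st.1 ++ [t], st.2.1, st.2.2)
  else if t.2 == "blue" then (st.1, st.2.1 ++ [t], st.2.2)
  else if t.2 == "yellow" then (st.1, st.2.1, st.2.2 ++ [t])
  else st

-- one loop appending each tuple to its bucket, then concatenation
def color_pairs (color_list : List (Int × String)) : List (Int × String) :=
  let st := color_list.foldl stepA ([], [], [])
  st.1 ++ st.2.1 ++ st.2.2

-- ===== PORT B =====
def pvRank : PySem.Dict String Int :=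
  PySem.Dict.ofList [("red", 0), ("blue", 1), ("yellow", 2)]

-- filter to recognized colors, then one stable sort by rank.  Python's rank[t[1]] is applied
-- only to tuples that passed the membership filter, where get? is some, so getD 0 is exact.
def pvKey (t : Int × String) : Int := (PySem.Dict.get? pvRank t.2).getD 0

def color_pairs_alt (color_list : List (Int × String)) : List (Int × String) :=
  let keep := color_list.filter (fun t => PySem.Dict.contains pvRank t.2)
  PySem.List.sorted keep pvKey

-- ===== PRECONDITION & SPEC =====
def Spec_color_pairs (color_list : List (Int × String)) (out : List (Int × String)) : Prop := out = color_pairs_alt color_list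
instance (color_list : List (Int × String)) (out : List (Int × String)) : Decidable (Spec_color_pairs color_list out) := by unfold Spec_color_pairs; infer_instance

-- ===== CLAIM (what is proved, stated in full; the proofs are below) =====
def Claim_equal_color_pairs : Prop := ∀ (color_list : List (Int × String)), Dom_color_pairs color_list → Spec_color_pairs color_list (color_pairs color_list)

-- ===== LEMMAS AND PROOFS =====

lemma contains_pvRank_false {s : String} (h1 : ¬ s = "red") (h2 : ¬ s = "blue")
    (h3 : ¬ s = "yellow") : PySem.Dict.contains pvRank s = false := by
  have h : pvRank = PySem.Dict.mk [("red", 0), ("blue", 1), ("yellow", 2)] := by decide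
  rw [h]
  simp only [PySem.Dict.contains_mk]
  simp [Ne.symm h1, Ne.symm h2, Ne.symm h3]

lemma pvKey_red {t : Int × String} (h : t.2 = "red") : pvKey t = 0 := by
  simp [pvKey, h]; decide
lemma pvKey_blue {t : Int × String} (h : t.2 = "blue") : pvKey t = 1 := by
  simp [pvKey, h]; decide
lemma pvKey_yellow {t : Int × String} (h : t.2 = "yellow") : pvKey t = 2 := by
  simp [pvKey, h]; decide

lemma insertBy_skip {α : Type} (before : α → α → Bool) (x : α) (as bs : List α)
    (h : ∀ a ∈ as, before x a = false) :
    PySem.List.insertBy before x (as ++ bs) = as ++ PySem.List.insertBy before x bs := by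
  induction as with
  | nil => rfl
  | cons a as ih =>
      simp only [List.cons_append, PySem.List.insertBy, h a (by simp)]
      simp [ih (fun a ha => h a (by simp [ha]))]

lemma insertBy_head {α : Type} (before : α → α → Bool) (x b : α) (bs : List α)
    (h : before x b = true) :
    PySem.List.insertBy before x (b :: bs) = x :: b :: bs := by
  simp [PySem.List.insertBy, h]

-- A's loop computes the three color filters
lemma foldA_eq (cl : List (Int × String))
    (R B Y : List (Int × String)) :
    cl.foldl stepA (R, B, Y)
    = (R ++ cl.filter (fun t => t.2 == "red"),
       B ++ cl.filter (fun t => t.2 == "blue"),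
       Y ++ cl.filter (fun t => t.2 == "yellow")) := by
  induction cl generalizing R B Y with
  | nil => simp
  | cons t cl ih =>
      rw [List.foldl_cons]
      by_cases hr : t.2 = "red"
      · have hs : stepA (R, B, Y) t = (R ++ [t], B, Y) := by simp [stepA, hr]
        rw [hs, ih]; simp [hr]
      · by_cases hb : t.2 = "blue"
        · have hs : stepA (R, B, Y) t = (R, B ++ [t], Y) := by simp [stepA, hb]
          rw [hs, ih]; simp [hb]
        · by_cases hy : t.2 = "yellow"
          · have hs : stepA (R, B, Y) t = (R, B, Y ++ [t]) := by simp [stepA, hy]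
            rw [hs, ih]; simp [hy]
          · have hs : stepA (R, B, Y) t = (R, B, Y) := by simp [stepA, hr, hb, hy]
            rw [hs, ih]; simp [hr, hb, hy]

-- B's stable insertion sort, unfolded to its insertBy fold, grows the same three buckets
lemma foldB_eq (cl : List (Int × String)) (R B Y : List (Int × String))
    (hR : ∀ a ∈ R, a.2 = "red") (hB : ∀ a ∈ B, a.2 = "blue") (hY : ∀ a ∈ Y, a.2 = "yellow") :
    (cl.filter (fun t => PySem.Dict.contains pvRank t.2)).foldl
      (fun acc x => PySem.List.insertBy (fun a b => decide (pvKey a < pvKey b)) x acc)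
      (R ++ B ++ Y)
    = (R ++ cl.filter (fun t => t.2 == "red"))
      ++ (B ++ cl.filter (fun t => t.2 == "blue"))
      ++ (Y ++ cl.filter (fun t => t.2 == "yellow")) := by
  induction cl generalizing R B Y with
  | nil => simp
  | cons t cl ih =>
      by_cases hr : t.2 = "red"
      · have fk : List.filter (fun t => PySem.Dict.contains pvRank t.2) (t :: cl)
            = t :: cl.filter (fun t => PySem.Dict.contains pvRank t.2) := by
          simp [List.filter_cons, hr]; decide
        have f1 : List.filter (fun t => t.2 == "red") (t :: cl)
            = t :: cl.filter (fun t => t.2 == "red") := by simp [hr]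
        have f2 : List.filter (fun t => t.2 == "blue") (t :: cl)
            = cl.filter (fun t => t.2 == "blue") := by simp [hr]
        have f3 : List.filter (fun t => t.2 == "yellow") (t :: cl)
            = cl.filter (fun t => t.2 == "yellow") := by simp [hr]
        have hins : PySem.List.insertBy (fun a b => decide (pvKey a < pvKey b)) t (R ++ B ++ Y)
            = (R ++ [t]) ++ B ++ Y := by
          rw [List.append_assoc, insertBy_skip _ _ R (B ++ Y)
            (fun a ha => by simp [pvKey_red hr, pvKey_red (hR a ha)])]
          cases hBY : B ++ Y with
          | nil => simp [hBY, PySem.List.insertBy]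
          | cons b bs =>
              have hb2 : b ∈ B ∨ b ∈ Y := by
                have : b ∈ B ++ Y := by rw [hBY]; simp
                simpa using this
              have hk : (1:Int) ≤ pvKey b := by
                rcases hb2 with h | h
                · rw [pvKey_blue (hB b h)]
                · rw [pvKey_yellow (hY b h)]; norm_num
              rw [insertBy_head _ _ _ _ (by simp [pvKey_red hr]; omega)]
              simp [← hBY]
        have hih := ih (R ++ [t]) B Y
          (fun a ha => by rcases (by simpa using ha : a ∈ R ∨ a = t) with h | h
                          · exact hR a h
                          · rw [h]; exact hr) hB hY
        rw [fk, f1, f2, f3, List.foldl_cons, hins, hih]; simp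
      · by_cases hb : t.2 = "blue"
        · have fk : List.filter (fun t => PySem.Dict.contains pvRank t.2) (t :: cl)
              = t :: cl.filter (fun t => PySem.Dict.contains pvRank t.2) := by
            simp [List.filter_cons, hb]; decide
          have f1 : List.filter (fun t => t.2 == "red") (t :: cl)
              = cl.filter (fun t => t.2 == "red") := by simp [hr]
          have f2 : List.filter (fun t => t.2 == "blue") (t :: cl)
              = t :: cl.filter (fun t => t.2 == "blue") := by simp [hb]
          have f3 : List.filter (fun t => t.2 == "yellow") (t :: cl)
              = cl.filter (fun t => t.2 == "yellow") := by simp [hb]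
          have hins : PySem.List.insertBy (fun a b => decide (pvKey a < pvKey b)) t (R ++ B ++ Y)
              = R ++ (B ++ [t]) ++ Y := by
            rw [List.append_assoc, insertBy_skip _ _ R (B ++ Y)
              (fun a ha => by simp [pvKey_blue hb, pvKey_red (hR a ha)]),
              insertBy_skip _ _ B Y
              (fun a ha => by simp [pvKey_blue hb, pvKey_blue (hB a ha)])]
            cases hYc : Y with
            | nil => simp [PySem.List.insertBy]
            | cons y ys =>
                rw [insertBy_head _ _ _ _
                  (by simp [pvKey_blue hb, pvKey_yellow (hY y (by rw [hYc]; simp))])]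
                simp
          have hih := ih R (B ++ [t]) Y hR
            (fun a ha => by rcases (by simpa using ha : a ∈ B ∨ a = t) with h | h
                            · exact hB a h
                            · rw [h]; exact hb) hY
          rw [fk, f1, f2, f3, List.foldl_cons, hins, hih]; simp
        · by_cases hy : t.2 = "yellow"
          · have fk : List.filter (fun t => PySem.Dict.contains pvRank t.2) (t :: cl)
                = t :: cl.filter (fun t => PySem.Dict.contains pvRank t.2) := by
              simp [List.filter_cons, hy]; decide
            have f1 : List.filter (fun t => t.2 == "red") (t :: cl)
                = cl.filter (fun t => t.2 == "red") := by simp [hr]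
            have f2 : List.filter (fun t => t.2 == "blue") (t :: cl)
                = cl.filter (fun t => t.2 == "blue") := by simp [hb]
            have f3 : List.filter (fun t => t.2 == "yellow") (t :: cl)
                = t :: cl.filter (fun t => t.2 == "yellow") := by simp [hy]
            have hins : PySem.List.insertBy (fun a b => decide (pvKey a < pvKey b)) t (R ++ B ++ Y)
                = R ++ B ++ (Y ++ [t]) := by
              rw [List.append_assoc, insertBy_skip _ _ R (B ++ Y)
                (fun a ha => by simp [pvKey_yellow hy, pvKey_red (hR a ha)]),
                insertBy_skip _ _ B Y
                (fun a ha => by simp [pvKey_yellow hy, pvKey_blue (hB a ha)]),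
                PySem.List.insertBy_of_forall_not_before _ _ Y
                (fun a ha => by simp [pvKey_yellow hy, pvKey_yellow (hY a ha)])]
              simp
            have hih := ih R B (Y ++ [t]) hR hB
              (fun a ha => by rcases (by simpa using ha : a ∈ Y ∨ a = t) with h | h
                              · exact hY a h
                              · rw [h]; exact hy)
            rw [fk, f1, f2, f3, List.foldl_cons, hins, hih]; simp
          · have hkeep : PySem.Dict.contains pvRank t.2 = false :=
              contains_pvRank_false hr hb hy
            have fk : List.filter (fun t => PySem.Dict.contains pvRank t.2) (t :: cl)
                = cl.filter (fun t => PySem.Dict.contains pvRank t.2) := by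
              simp [hkeep]
            have f1 : List.filter (fun t => t.2 == "red") (t :: cl)
                = cl.filter (fun t => t.2 == "red") := by simp [hr]
            have f2 : List.filter (fun t => t.2 == "blue") (t :: cl)
                = cl.filter (fun t => t.2 == "blue") := by simp [hb]
            have f3 : List.filter (fun t => t.2 == "yellow") (t :: cl)
                = cl.filter (fun t => t.2 == "yellow") := by simp [hy]
            rw [fk, f1, f2, f3]
            exact ih R B Y hR hB hY

-- ===== VERDICT (by name: the statement is the Claim_ definition above) =====
theorem color_pairs_spec : Claim_equal_color_pairs := by
  intro cl _
  show color_pairs cl = color_pairs_alt cl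
  rw [color_pairs, color_pairs_alt]
  simp only [foldA_eq, PySem.List.sorted_eq_foldl_insertBy]
  have := foldB_eq cl [] [] [] (by simp) (by simp) (by simp)
  simp only [List.nil_append] at this
  exact this.symm
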